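-- pv_equiv track=rewrite | github.com/Kieran-Thompson/Advent-Of-Code | AdventOfCode/2019/04_19_SecureContainer.py | repeatedpairNoGroup
-- ===== SOURCE A (Python) =====
-- from collections import Counter
--
-- def repeatedpairNoGroup(value):
--      number = list(str(value))
--      for i in range(len(number)-1):
--           if number[i] == number[i+1]:
--                frequency = Counter(number)
--                if(frequency[str(number[i])]==2):
--                     return True
--      return False
-- ===== SOURCE B (Python) =====
-- from collections import Counter
--
-- def repeatedpairNoGroup(value):
--      # One-pass run-length scan with a Counter built once (A rebuilds it per pair).
--      s = str(value)
--      counts = Counter(s)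
--      run_char, run_len = None, 0
--      for ch in s:
--           if ch == run_char:
--                run_len += 1
--           else:
--                if run_len >= 2 and counts[run_char] == 2:
--                     return True
--                run_char, run_len = ch, 1
--      return run_len >= 2 and counts[run_char] == 2
-- ===== Notes on version B (the rewrite author's own statement) =====
-- stated objective: alternative
-- what changed: Replaces A's adjacent-index scan that rebuilds a Counter inside the loop with a single up-front Counter plus one run-length pass that checks each maximal run (length >= 2 and global count == 2).
import Mathlib
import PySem

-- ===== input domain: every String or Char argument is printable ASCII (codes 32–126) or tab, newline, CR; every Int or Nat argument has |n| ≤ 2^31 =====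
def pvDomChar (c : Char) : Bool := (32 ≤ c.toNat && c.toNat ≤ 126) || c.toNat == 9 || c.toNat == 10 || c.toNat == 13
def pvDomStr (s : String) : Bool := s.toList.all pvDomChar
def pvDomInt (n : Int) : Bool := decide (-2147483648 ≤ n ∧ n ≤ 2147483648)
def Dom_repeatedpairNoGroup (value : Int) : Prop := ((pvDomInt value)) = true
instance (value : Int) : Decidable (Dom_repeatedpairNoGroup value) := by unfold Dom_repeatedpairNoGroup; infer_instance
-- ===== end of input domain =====

-- B replaces A's adjacent-index scan (which rebuilds Counter inside the loop) by one
-- run-length pass over the digits with a single Counter built up front (objective: simpler/faster constant factor).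

-- ===== PORT A =====
-- for i in range(len(number)-1): if number[i]==number[i+1] and Counter(number)[number[i]]==2: return True
def repeatedpairNoGroup (value : Int) : Bool :=
  let number := (PySem.Int.toStr value).toList
  (PySem.List.pyRange 0 ((number.length : Int) - 1) 1).any (fun i =>
    if PySem.List.pyGetD number i ' ' == PySem.List.pyGetD number (i + 1) ' ' then
      let frequency := PySem.Dict.counter number
      PySem.Dict.getD frequency (PySem.List.pyGetD number i ' ') 0 == (2 : Int)
    else false)

-- ===== PORT B =====
-- run_len >= 2 and counts[run_char] == 2 (run_char is None before the first char)
def pvAltCond (counts : PySem.Dict Char Int) (rc : Option Char) (rl : Nat) : Bool :=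
  decide (2 ≤ rl) &&
    (match rc with
     | some c => PySem.Dict.getD counts c 0 == (2 : Int)
     | none => false)

-- the for-loop of B: maintain the current run (char, length), check a run when it ends
def pvAltLoop (counts : PySem.Dict Char Int) (rc : Option Char) (rl : Nat) :
    List Char → Bool
  | [] => pvAltCond counts rc rl
  | ch :: t =>
    if some ch == rc then pvAltLoop counts rc (rl + 1) t
    else if pvAltCond counts rc rl then true
    else pvAltLoop counts (some ch) 1 t

def repeatedpairNoGroup_alt (value : Int) : Bool :=
  let s := (PySem.Int.toStr value).toList
  let counts := PySem.Dict.counter s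
  pvAltLoop counts none 0 s

-- ===== PRECONDITION & SPEC =====
def Spec_repeatedpairNoGroup (value : Int) (out : Bool) : Prop := out = repeatedpairNoGroup_alt value
instance (value : Int) (out : Bool) : Decidable (Spec_repeatedpairNoGroup value out) := by unfold Spec_repeatedpairNoGroup; infer_instance

-- ===== CLAIM (what is proved, stated in full; the proofs are below) =====
def Claim_equal_repeatedpairNoGroup : Prop := ∀ (value : Int), Dom_repeatedpairNoGroup value → Spec_repeatedpairNoGroup value (repeatedpairNoGroup value)

-- ===== LEMMAS AND PROOFS =====

-- adjacent-pair predicate: some adjacent equal pair whose char satisfies P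
def pvAdj (P : Char → Bool) : List Char → Bool
  | a :: b :: t => (a == b && P a) || pvAdj P (b :: t)
  | _ => false

theorem pvAdj_iff (P : Char → Bool) (s : List Char) :
    pvAdj P s = true ↔
      ∃ k : Nat, ∃ h : k + 1 < s.length, s[k] = s[k + 1] ∧ P s[k] = true := by
  induction s with
  | nil => simp [pvAdj]
  | cons a t ih =>
    cases t with
    | nil => simp [pvAdj]
    | cons b t' =>
      simp only [pvAdj, Bool.or_eq_true, Bool.and_eq_true, beq_iff_eq, ih]
      constructor
      · rintro (⟨hab, hp⟩ | ⟨k, hk, h1, h2⟩)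
        · exact ⟨0, by simp, by simpa using hab, by simpa using hp⟩
        · exact ⟨k + 1, by simpa using hk, by simpa using h1, by simpa using h2⟩
      · rintro ⟨k, hk, h1, h2⟩
        cases k with
        | zero => exact Or.inl ⟨by simpa using h1, by simpa using h2⟩
        | succ k =>
          exact Or.inr ⟨k, by simpa using hk, by simpa using h1, by simpa using h2⟩

theorem pvA_iff (s : List Char) (f : Char → Bool) :
    ((PySem.List.pyRange 0 ((s.length : Int) - 1) 1).any (fun i =>
        if PySem.List.pyGetD s i ' ' == PySem.List.pyGetD s (i + 1) ' ' then
          f (PySem.List.pyGetD s i ' ')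
        else false)) = true ↔
      ∃ k : Nat, ∃ h : k + 1 < s.length, s[k] = s[k + 1] ∧ f s[k] = true := by
  rw [List.any_eq_true]
  constructor
  · rintro ⟨i, hmem, hbody⟩
    rw [PySem.List.mem_pyRange_one] at hmem
    obtain ⟨h0, hlt⟩ := hmem
    have hk1 : i.toNat + 1 < s.length := by omega
    have hi : i = (i.toNat : Int) := by omega
    rw [hi, PySem.List.pyGetD_eq_getElem s ' ' (by omega) (by omega)] at hbody
    have : ((i.toNat : Int) + 1) = ((i.toNat + 1 : Nat) : Int) := by omega
    rw [this, PySem.List.pyGetD_eq_getElem s ' ' (by omega) (by omega)] at hbody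
    simp only [Int.toNat_natCast] at hbody
    split_ifs at hbody with heq
    · exact ⟨i.toNat, hk1, by simpa using heq, hbody⟩
  · rintro ⟨k, hk, h1, h2⟩
    refine ⟨(k : Int), ?_, ?_⟩
    · rw [PySem.List.mem_pyRange_one]; omega
    · rw [PySem.List.pyGetD_eq_getElem s ' ' (by omega) (by push_cast; omega)]
      have : ((k : Int) + 1) = ((k + 1 : Nat) : Int) := by omega
      rw [this, PySem.List.pyGetD_eq_getElem s ' ' (by omega) (by omega)]
      simp only [Int.toNat_natCast]
      rw [if_pos (by simpa using h1)]
      exact h2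

theorem pvAdj_replicate (P : Char → Bool) (c : Char) (r : List Char) :
    ∀ rl : Nat, 1 ≤ rl →
      pvAdj P (List.replicate rl c ++ r) = ((decide (2 ≤ rl) && P c) || pvAdj P (c :: r)) := by
  intro rl
  induction rl with
  | zero => omega
  | succ m ih =>
    intro _
    cases m with
    | zero => simp [List.replicate]
    | succ m' =>
      have hrep : List.replicate (m' + 1 + 1) c ++ r
          = c :: (List.replicate (m' + 1) c ++ r) := by
        simp [List.replicate_succ]
      rw [hrep]
      have hhead : List.replicate (m' + 1) c ++ r = c :: (List.replicate m' c ++ r) := by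
        simp [List.replicate_succ]
      rw [show pvAdj P (c :: (List.replicate (m' + 1) c ++ r))
            = ((c == c && P c) || pvAdj P (List.replicate (m' + 1) c ++ r)) from by
            rw [hhead]; rfl]
      rw [ih (by omega)]
      have h2 : decide (2 ≤ m' + 1 + 1) = true := by simp
      rw [h2]
      cases P c <;> cases pvAdj P (c :: r) <;> simp

theorem pvAltLoop_run (counts : PySem.Dict Char Int) (t : List Char) :
    ∀ (c : Char) (rl : Nat), 1 ≤ rl →
      pvAltLoop counts (some c) rl t
        = pvAdj (fun x => PySem.Dict.getD counts x 0 == (2 : Int)) (List.replicate rl c ++ t) := by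
  induction t with
  | nil =>
    intro c rl h1
    rw [pvAdj_replicate _ _ _ rl h1]
    simp [pvAltLoop, pvAltCond, pvAdj]
  | cons ch t' ih =>
    intro c rl h1
    rw [pvAdj_replicate _ _ _ rl h1]
    by_cases hch : ch = c
    · subst hch
      have : pvAltLoop counts (some ch) rl (ch :: t') = pvAltLoop counts (some ch) (rl + 1) t' := by
        simp [pvAltLoop]
      rw [this, ih ch (rl + 1) (by omega), pvAdj_replicate _ _ _ (rl + 1) (by omega)]
      have h2 : decide (2 ≤ rl + 1) = true := by simp; omega
      rw [h2]
      show _ = ((decide (2 ≤ rl) && _) || ((ch == ch && _) || pvAdj _ (ch :: t')))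
      simp only [beq_self_eq_true, Bool.true_and]
      cases h : PySem.Dict.getD counts ch 0 == (2 : Int) <;>
        cases pvAdj (fun x => PySem.Dict.getD counts x 0 == (2 : Int)) (ch :: t') <;>
        simp
    · have hne : (some ch == some c) = false := by simp [hch]
      have step : pvAltLoop counts (some c) rl (ch :: t')
          = if pvAltCond counts (some c) rl then true
            else pvAltLoop counts (some ch) 1 t' := by
        simp [pvAltLoop, hne]
      rw [step, ih ch 1 (by omega)]
      have hrep1 : List.replicate 1 ch ++ t' = ch :: t' := by simp
      rw [hrep1]
      show _ = ((decide (2 ≤ rl) && _) || ((c == ch && _) || pvAdj _ (ch :: t')))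
      have hcc : (c == ch) = false := by
        have hne' : c ≠ ch := fun h => hch h.symm
        simp [hne']
      rw [hcc]
      simp only [Bool.false_and, Bool.false_or, pvAltCond]
      by_cases hX : (decide (2 ≤ rl) && (PySem.Dict.getD counts c 0 == (2 : Int))) = true
      · rw [if_pos hX, hX]; simp
      · rw [if_neg hX]
        rw [Bool.not_eq_true] at hX
        rw [hX]; simp

theorem pvAltLoop_top (counts : PySem.Dict Char Int) (s : List Char) :
    pvAltLoop counts none 0 s
      = pvAdj (fun x => PySem.Dict.getD counts x 0 == (2 : Int)) s := by
  cases s with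
  | nil => simp [pvAltLoop, pvAltCond, pvAdj]
  | cons a t =>
    have : pvAltLoop counts none 0 (a :: t) = pvAltLoop counts (some a) 1 t := by
      simp [pvAltLoop, pvAltCond]
    rw [this, pvAltLoop_run counts t a 1 (by omega)]
    simp

-- ===== VERDICT (by name: the statement is the Claim_ definition above) =====
theorem repeatedpairNoGroup_spec : Claim_equal_repeatedpairNoGroup := by
  intro value _
  unfold Spec_repeatedpairNoGroup repeatedpairNoGroup repeatedpairNoGroup_alt
  set s := (PySem.Int.toStr value).toList with hs
  rw [pvAltLoop_top]
  rw [Bool.eq_iff_iff]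
  rw [pvA_iff s (fun c => PySem.Dict.getD (PySem.Dict.counter s) c 0 == (2 : Int)),
      pvAdj_iff]
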